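-- pv_equiv track=rewrite | github.com/ejwillemse/mcarptif | solver/py_solution_builders.py | build_CARP_cum_list_from_lists
-- ===== SOURCE A (Python) =====
-- def build_CARP_cum_list_from_route(route, demand, serviceL, d, depot, dumpcost):
--
--     temp_list_l = []
--     temp_list_s = []
--     total_load = 0
--     total_serve = 0
--     for arc in route:
--         total_load += demand[arc]
--         total_serve += serviceL[arc]
--         temp_list_l.append(total_load)
--         temp_list_s.append(total_serve)
--
--     temp_list_d = []
--     arc = route[0]
--     arc_pre = depot
--     total_dead = d[arc_pre][arc]
--     temp_list_d.append(total_dead)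
--     for j in range(1,len(route)):
--         arc = route[j]
--         arc_pre = route[j-1]
--         total_dead += d[arc_pre][arc]
--         temp_list_d.append(total_dead)
--     arc_pre = route[-1]
--     arc = depot
--     total_dead += d[arc_pre][arc] + dumpcost
--     temp_list_d.append(total_dead)
--     return(temp_list_l, temp_list_s, temp_list_d)
--
-- def build_CARP_cum_list_from_lists(solution_lists, demand, serviceL, d, depot, dumpcost):
--     routes = []
--     loads = []
--     service = []
--     deadhead = []
--     for route in solution_lists[0]:
--         (temp_list_l, temp_list_s, temp_list_d) = build_CARP_cum_list_from_route(route, demand, serviceL, d, depot, dumpcost)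
--         routes.append(route)
--         loads.append(temp_list_l)
--         service.append(temp_list_s)
--         deadhead.append(temp_list_d)
--     return(routes, loads, service, deadhead)
-- ===== SOURCE B (Python) =====
-- def _walk_cost(path, d):
--     return sum(d[a][b] for a, b in zip(path, path[1:]))
--
--
-- def build_CARP_cum_list_from_lists(solution_lists, demand, serviceL, d, depot, dumpcost):
--     routes = list(solution_lists[0])
--     loads = [[sum(demand[a] for a in r[:k + 1]) for k in range(len(r))]
--              for r in routes]
--     service = [[sum(serviceL[a] for a in r[:k + 1]) for k in range(len(r))]
--                for r in routes]
--     deadhead = [[_walk_cost([depot] + r[:k + 1], d) for k in range(len(r))]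
--                 + [_walk_cost([depot] + r + [depot], d) + dumpcost]
--                 for r in routes]
--     return (routes, loads, service, deadhead)
-- ===== Notes on version B (the rewrite author's own statement) =====
-- stated objective: alternative
-- what changed: Drops all running accumulators: every cumulative entry is recomputed independently from scratch as the sum over an explicit prefix slice (loads/service) or as the total cost of the explicit depot-prefixed walk (deadhead), trading A's linear one-pass accumulation for a quadratic per-entry closed form.
import Mathlib
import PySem

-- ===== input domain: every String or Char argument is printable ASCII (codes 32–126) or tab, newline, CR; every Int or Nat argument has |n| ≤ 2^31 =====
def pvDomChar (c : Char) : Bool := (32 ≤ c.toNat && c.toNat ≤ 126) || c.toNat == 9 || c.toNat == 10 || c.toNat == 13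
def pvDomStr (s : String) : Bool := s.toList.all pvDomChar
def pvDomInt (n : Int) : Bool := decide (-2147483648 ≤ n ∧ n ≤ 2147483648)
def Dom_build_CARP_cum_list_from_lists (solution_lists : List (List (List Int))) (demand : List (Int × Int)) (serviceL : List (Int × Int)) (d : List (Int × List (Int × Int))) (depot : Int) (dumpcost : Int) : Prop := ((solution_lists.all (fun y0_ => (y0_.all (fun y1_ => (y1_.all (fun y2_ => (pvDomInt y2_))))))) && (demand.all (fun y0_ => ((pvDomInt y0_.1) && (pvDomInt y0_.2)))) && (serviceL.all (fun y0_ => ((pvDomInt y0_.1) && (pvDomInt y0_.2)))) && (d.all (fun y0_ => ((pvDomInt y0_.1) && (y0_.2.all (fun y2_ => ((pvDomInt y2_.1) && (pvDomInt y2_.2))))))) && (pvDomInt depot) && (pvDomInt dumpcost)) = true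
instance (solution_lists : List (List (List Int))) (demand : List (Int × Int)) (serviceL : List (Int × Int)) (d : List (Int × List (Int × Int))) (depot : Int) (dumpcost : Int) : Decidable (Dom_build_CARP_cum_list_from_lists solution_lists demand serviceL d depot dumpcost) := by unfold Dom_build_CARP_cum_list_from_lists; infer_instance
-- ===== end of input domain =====

-- B drops A's three running-accumulator loops entirely and recomputes every cumulative
-- entry independently from scratch: a sum over an explicit prefix slice (loads/service),
-- or the total cost of the explicit depot-prefixed walk (deadhead). Objective:
-- alternative (per-entry closed form; quadratic per route instead of linear).

-- ===== PORT A =====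
-- demand[arc] / serviceL[arc]: Python dict lookup (first match in the association list);
-- the .getD 0 default is unreachable under Pre_ (Python raises KeyError there).
def pvGetI (m : List (Int × Int)) (k : Int) : Int := (m.lookup k).getD 0
-- d[a][b]: nested dict lookup; defaults unreachable under Pre_.
def pvGetDD (d : List (Int × List (Int × Int))) (a b : Int) : Int := (((d.lookup a).getD []).lookup b).getD 0

-- literal port of build_CARP_cum_list_from_route
def build_CARP_cum_list_from_route (route : List Int) (demand : List (Int × Int)) (serviceL : List (Int × Int)) (d : List (Int × List (Int × Int))) (depot : Int) (dumpcost : Int) : List Int × List Int × List Int :=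
  let st := route.foldl
    (fun (st : List Int × List Int × Int × Int) arc =>
      (st.1 ++ [st.2.2.1 + pvGetI demand arc], st.2.1 ++ [st.2.2.2 + pvGetI serviceL arc],
       st.2.2.1 + pvGetI demand arc, st.2.2.2 + pvGetI serviceL arc))
    ([], [], 0, 0)
  let temp_list_l := st.1
  let temp_list_s := st.2.1
  let arc := PySem.List.pyGetD route 0 0          -- route[0]; IndexError on empty route is outside Pre_
  let total_dead := pvGetDD d depot arc
  let st2 := (PySem.List.pyRange 1 (route.length : Int) 1).foldl
    (fun (st : List Int × Int) j =>
      (st.1 ++ [st.2 + pvGetDD d (PySem.List.pyGetD route (j - 1) 0) (PySem.List.pyGetD route j 0)],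
       st.2 + pvGetDD d (PySem.List.pyGetD route (j - 1) 0) (PySem.List.pyGetD route j 0)))
    ([total_dead], total_dead)
  let arc_pre := PySem.List.pyGetD route (-1) 0   -- route[-1]
  (temp_list_l, temp_list_s, st2.1 ++ [st2.2 + pvGetDD d arc_pre depot + dumpcost])

def build_CARP_cum_list_from_lists (solution_lists : List (List (List Int))) (demand : List (Int × Int)) (serviceL : List (Int × Int)) (d : List (Int × List (Int × Int))) (depot : Int) (dumpcost : Int) : List (List Int) × List (List Int) × List (List Int) × List (List Int) :=
  -- solution_lists[0]; IndexError on [] is outside Pre_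
  (PySem.List.pyGetD solution_lists 0 []).foldl
    (fun (st : List (List Int) × List (List Int) × List (List Int) × List (List Int)) route =>
      let t := build_CARP_cum_list_from_route route demand serviceL d depot dumpcost
      (st.1 ++ [route], st.2.1 ++ [t.1], st.2.2.1 ++ [t.2.1], st.2.2.2 ++ [t.2.2]))
    ([], [], [], [])

-- ===== PORT B =====
-- _walk_cost(path, d): total cost of the consecutive-pair walk along path
def pvWalkCost (path : List Int) (d : List (Int × List (Int × Int))) : Int :=
  ((path.zip (PySem.List.slice path (some 1) none)).map (fun p => pvGetDD d p.1 p.2)).sum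

def build_CARP_cum_list_from_lists_alt (solution_lists : List (List (List Int))) (demand : List (Int × Int)) (serviceL : List (Int × Int)) (d : List (Int × List (Int × Int))) (depot : Int) (dumpcost : Int) : List (List Int) × List (List Int) × List (List Int) × List (List Int) :=
  let routes := PySem.List.pyGetD solution_lists 0 []   -- list(solution_lists[0])
  (routes,
   routes.map (fun r => (PySem.List.pyRange 0 (r.length : Int) 1).map (fun k =>
      ((PySem.List.slice r none (some (k + 1))).map (fun a => pvGetI demand a)).sum)),
   routes.map (fun r => (PySem.List.pyRange 0 (r.length : Int) 1).map (fun k =>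
      ((PySem.List.slice r none (some (k + 1))).map (fun a => pvGetI serviceL a)).sum)),
   routes.map (fun r =>
      ((PySem.List.pyRange 0 (r.length : Int) 1).map (fun k =>
         pvWalkCost (depot :: PySem.List.slice r none (some (k + 1))) d))
      ++ [pvWalkCost (depot :: r ++ [depot]) d + dumpcost]))

-- ===== PRECONDITION & SPEC =====
-- Pre_ excludes exactly the inputs where the Python A raises: an empty solution_lists
-- (IndexError on solution_lists[0]), an empty route (IndexError on route[0]), or a
-- missing key in demand/serviceL/d (KeyError).
def Pre_build_CARP_cum_list_from_lists (solution_lists : List (List (List Int))) (demand : List (Int × Int)) (serviceL : List (Int × Int)) (d : List (Int × List (Int × Int))) (depot : Int) (dumpcost : Int) : Prop :=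
  solution_lists ≠ [] ∧
  ∀ route ∈ solution_lists.headD [],
    route ≠ [] ∧
    (∀ arc ∈ route, (demand.lookup arc).isSome = true ∧ (serviceL.lookup arc).isSome = true) ∧
    (((d.lookup depot).bind (fun r => r.lookup (route.headD 0))).isSome = true) ∧
    (∀ p ∈ route.zip route.tail, ((d.lookup p.1).bind (fun r => r.lookup p.2)).isSome = true) ∧
    (((d.lookup (route.getLastD 0)).bind (fun r => r.lookup depot)).isSome = true)
instance (solution_lists : List (List (List Int))) (demand : List (Int × Int)) (serviceL : List (Int × Int)) (d : List (Int × List (Int × Int))) (depot : Int) (dumpcost : Int) : Decidable (Pre_build_CARP_cum_list_from_lists solution_lists demand serviceL d depot dumpcost) := by unfold Pre_build_CARP_cum_list_from_lists; infer_instance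

def pvWitness_build_CARP_cum_list_from_lists : List (List (List Int)) × (List (Int × Int)) × (List (Int × Int)) × (List (Int × List (Int × Int))) × Int × Int :=
  ([[[1, 2]]], [(1, 3), (2, 4)], [(1, 1), (2, 2)], [(0, [(1, 5)]), (1, [(2, 6)]), (2, [(0, 7)])], 0, 10)

def Spec_build_CARP_cum_list_from_lists (solution_lists : List (List (List Int))) (demand : List (Int × Int)) (serviceL : List (Int × Int)) (d : List (Int × List (Int × Int))) (depot : Int) (dumpcost : Int) (out : List (List Int) × List (List Int) × List (List Int) × List (List Int)) : Prop := out = build_CARP_cum_list_from_lists_alt solution_lists demand serviceL d depot dumpcost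
instance (solution_lists : List (List (List Int))) (demand : List (Int × Int)) (serviceL : List (Int × Int)) (d : List (Int × List (Int × Int))) (depot : Int) (dumpcost : Int) (out : List (List Int) × List (List Int) × List (List Int) × List (List Int)) : Decidable (Spec_build_CARP_cum_list_from_lists solution_lists demand serviceL d depot dumpcost out) := by unfold Spec_build_CARP_cum_list_from_lists; infer_instance

-- ===== CLAIM (what is proved, stated in full; the proofs are below) =====
def Claim_equal_build_CARP_cum_list_from_lists : Prop := ∀ (solution_lists : List (List (List Int))) (demand : List (Int × Int)) (serviceL : List (Int × Int)) (d : List (Int × List (Int × Int))) (depot : Int) (dumpcost : Int), Dom_build_CARP_cum_list_from_lists solution_lists demand serviceL d depot dumpcost → Pre_build_CARP_cum_list_from_lists solution_lists demand serviceL d depot dumpcost → Spec_build_CARP_cum_list_from_lists solution_lists demand serviceL d depot dumpcost (build_CARP_cum_list_from_lists solution_lists demand serviceL d depot dumpcost)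

-- ===== LEMMAS AND PROOFS =====

-- proof-side prefix-sum (characterizes A's accumulator loops)
def pvPref (t : Int) : List Int → List Int
  | [] => []
  | x :: xs => (t + x) :: pvPref (t + x) xs

theorem pvPref_length (xs : List Int) : ∀ t : Int, (pvPref t xs).length = xs.length := by
  induction xs with
  | nil => intro t; rfl
  | cons x xs ih => intro t; simp [pvPref, ih]

theorem pvPref_getElem (xs : List Int) : ∀ (t : Int) (k : Nat) (h : k < xs.length)
    (h' : k < (pvPref t xs).length),
    (pvPref t xs)[k] = t + (xs.take (k + 1)).sum := by
  induction xs with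
  | nil => intro t k _h h'; simp [pvPref] at h'
  | cons x xs ih =>
    intro t k h h'
    cases k with
    | zero => simp [pvPref]
    | succ k =>
      simp only [pvPref, List.getElem_cons_succ, List.take_succ_cons, List.sum_cons]
      rw [ih (t + x) k (by simpa using h) (by rw [pvPref_length]; simpa using h)]
      ring

theorem ls_loop (demand serviceL : List (Int × Int)) (route : List Int) :
    ∀ (tl ts : List Int) (l s : Int),
    route.foldl
      (fun (st : List Int × List Int × Int × Int) arc =>
        (st.1 ++ [st.2.2.1 + pvGetI demand arc], st.2.1 ++ [st.2.2.2 + pvGetI serviceL arc],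
         st.2.2.1 + pvGetI demand arc, st.2.2.2 + pvGetI serviceL arc)) (tl, ts, l, s)
    = (tl ++ pvPref l (route.map (fun arc => pvGetI demand arc)),
       ts ++ pvPref s (route.map (fun arc => pvGetI serviceL arc)),
       l + (route.map (fun arc => pvGetI demand arc)).sum,
       s + (route.map (fun arc => pvGetI serviceL arc)).sum) := by
  induction route with
  | nil => intro tl ts l s; simp [pvPref]
  | cons a r ih =>
    intro tl ts l s
    simp only [List.foldl_cons, ih, List.map_cons, pvPref, List.sum_cons, List.append_assoc,
      List.singleton_append, Prod.mk.injEq]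
    and_intros <;> first | trivial | rw [add_assoc]

theorem dead_loop (d : List (Int × List (Int × Int))) (route : List Int) (js : List Int) :
    ∀ (tmp : List Int) (tot : Int),
    js.foldl
      (fun (st : List Int × Int) j =>
        (st.1 ++ [st.2 + pvGetDD d (PySem.List.pyGetD route (j - 1) 0) (PySem.List.pyGetD route j 0)],
         st.2 + pvGetDD d (PySem.List.pyGetD route (j - 1) 0) (PySem.List.pyGetD route j 0)))
      (tmp, tot)
    = (tmp ++ pvPref tot (js.map (fun j => pvGetDD d (PySem.List.pyGetD route (j - 1) 0) (PySem.List.pyGetD route j 0))),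
       tot + (js.map (fun j => pvGetDD d (PySem.List.pyGetD route (j - 1) 0) (PySem.List.pyGetD route j 0))).sum) := by
  induction js with
  | nil => intro tmp tot; simp [pvPref]
  | cons j js ih =>
    intro tmp tot
    simp only [List.foldl_cons, ih, List.map_cons, pvPref, List.sum_cons, List.append_assoc,
      List.singleton_append, Prod.mk.injEq]
    and_intros <;> first | trivial | rw [add_assoc]

-- range(1, len(route)) indexing of adjacent pairs equals zip(route, route[1:])
theorem adj_map (d : List (Int × List (Int × Int))) (route : List Int) :
    (PySem.List.pyRange 1 (route.length : Int) 1).map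
      (fun j => pvGetDD d (PySem.List.pyGetD route (j - 1) 0) (PySem.List.pyGetD route j 0))
    = (route.zip route.tail).map (fun p => pvGetDD d p.1 p.2) := by
  apply List.ext_getElem
  · simp only [List.length_map, PySem.List.length_pyRange_one, List.length_zip,
      List.length_tail]
    omega
  · intro k h1 h2
    have h1' : k < ((route.length : Int) - 1).toNat := by
      simpa [PySem.List.length_pyRange_one] using h1
    have hk1 : k + 1 < route.length := by omega
    have hk0 : k < route.length := by omega
    simp only [List.getElem_map, PySem.List.getElem_pyRange_one, List.getElem_zip]
    have e1 : (1 : Int) + (k : Nat) - 1 = ((k : Nat) : Int) := by ring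
    have e2 : (1 : Int) + (k : Nat) = (((k + 1 : Nat)) : Int) := by push_cast; ring
    rw [e1, e2, PySem.List.pyGetD_natCast, PySem.List.pyGetD_natCast,
      List.getD_eq_getElem route 0 hk0, List.getD_eq_getElem route 0 hk1]
    congr 1
    rw [List.getElem_tail]

-- adjacent pairs of a prefix are a prefix of the adjacent pairs
theorem zip_tail_take (xs : List Int) : ∀ k : Nat,
    (xs.take (k + 1)).zip (xs.take (k + 1)).tail = (xs.zip xs.tail).take k := by
  induction xs with
  | nil => intro k; simp
  | cons a xs ih =>
    intro k
    cases k with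
    | zero => simp
    | succ k =>
      cases xs with
      | nil => simp
      | cons b xs' =>
        have h := ih k
        simp only [List.take_succ_cons, List.tail_cons] at h
        simp [h]

-- adjacent pairs after appending a node
theorem zip_tail_snoc (y : Int) : ∀ (xs : List Int) (h : xs ≠ []),
    (xs ++ [y]).zip ((xs ++ [y]).tail) = xs.zip xs.tail ++ [(xs.getLast h, y)] := by
  intro xs
  induction xs with
  | nil => intro h; simp at h
  | cons a xs ih =>
    intro _
    cases xs with
    | nil => simp
    | cons b xs' =>
      have h := ih (by simp)
      simp only [List.cons_append, List.tail_cons] at h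
      rw [List.getLast_cons (by simp)]
      simp [h]

theorem walk_eq (path : List Int) (d : List (Int × List (Int × Int))) :
    pvWalkCost path d = ((path.zip path.tail).map (fun p => pvGetDD d p.1 p.2)).sum := by
  simp [pvWalkCost, PySem.List.slice_from_one]

-- loads/service: A's prefix-sum list equals B's per-entry prefix-slice sums
theorem prefix_eq (f : Int → Int) (r : List Int) :
    pvPref 0 (r.map f) = (PySem.List.pyRange 0 (r.length : Int) 1).map
      (fun k => ((PySem.List.slice r none (some (k + 1))).map f).sum) := by
  apply List.ext_getElem
  · simp [pvPref_length, PySem.List.length_pyRange_one]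
  · intro k h1 h2
    have hk : k < r.length := by simpa [pvPref_length] using h1
    rw [pvPref_getElem (r.map f) 0 k (by simpa using hk) h1]
    simp only [List.getElem_map, PySem.List.getElem_pyRange_one]
    have e : (0 : Int) + (k : Nat) + 1 = (((k + 1 : Nat)) : Int) := by push_cast; ring
    rw [e, PySem.List.slice_to_natCast, ← List.map_take]
    ring

-- deadhead, main part: A's accumulated list equals B's per-entry walk costs
theorem dead_main_eq (d : List (Int × List (Int × Int))) (depot : Int)
    (a : Int) (rest : List Int) :
    let r := a :: rest
    let incs := (r.zip r.tail).map (fun p => pvGetDD d p.1 p.2)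
    [pvGetDD d depot a] ++ pvPref (pvGetDD d depot a) incs
      = (PySem.List.pyRange 0 (r.length : Int) 1).map
          (fun k => pvWalkCost (depot :: PySem.List.slice r none (some (k + 1))) d) := by
  intro r incs
  have hlen : incs.length = rest.length := by simp [incs, r]
  apply List.ext_getElem
  · simp [pvPref_length, PySem.List.length_pyRange_one, hlen, r]
  · intro k h1 h2
    have hk : k < rest.length + 1 := by
      simpa [pvPref_length, hlen] using h1
    simp only [List.getElem_map, PySem.List.getElem_pyRange_one]
    have e : (0 : Int) + (k : Nat) + 1 = (((k + 1 : Nat)) : Int) := by push_cast; ring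
    rw [e, PySem.List.slice_to_natCast, walk_eq]
    have htake : r.take (k + 1) = a :: rest.take k := by simp [r]
    have hzip : (depot :: r.take (k + 1)).zip (r.take (k + 1))
        = (depot, a) :: ((r.take (k + 1)).zip (r.take (k + 1)).tail) := by
      rw [htake]; simp
    rw [show (depot :: r.take (k + 1)).tail = r.take (k + 1) from rfl, hzip, zip_tail_take]
    simp only [List.map_cons, List.sum_cons]
    cases k with
    | zero =>
      simp [incs]
    | succ j =>
      simp only [List.singleton_append, List.getElem_cons_succ]
      rw [pvPref_getElem incs _ j (by simp [hlen]; omega) (by simp [pvPref_length, hlen]; omega)]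
      simp [incs, List.map_take]

-- per-route agreement of the two algorithms
theorem route_eq (route : List Int) (demand serviceL : List (Int × Int))
    (d : List (Int × List (Int × Int))) (depot dumpcost : Int) (hne : route ≠ []) :
    build_CARP_cum_list_from_route route demand serviceL d depot dumpcost
    = ((PySem.List.pyRange 0 (route.length : Int) 1).map (fun k =>
         ((PySem.List.slice route none (some (k + 1))).map (fun a => pvGetI demand a)).sum),
       (PySem.List.pyRange 0 (route.length : Int) 1).map (fun k =>
         ((PySem.List.slice route none (some (k + 1))).map (fun a => pvGetI serviceL a)).sum),
       ((PySem.List.pyRange 0 (route.length : Int) 1).map (fun k =>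
          pvWalkCost (depot :: PySem.List.slice route none (some (k + 1))) d))
         ++ [pvWalkCost (depot :: route ++ [depot]) d + dumpcost]) := by
  obtain ⟨a, rest, rfl⟩ := List.exists_cons_of_ne_nil hne
  unfold build_CARP_cum_list_from_route
  dsimp only
  rw [ls_loop, dead_loop, adj_map]
  simp only [List.nil_append, Prod.mk.injEq]
  refine ⟨by rw [prefix_eq], by rw [prefix_eq], ?_⟩
  have h0 : PySem.List.pyGetD (a :: rest) 0 0 = a := PySem.List.pyGetD_zero_cons a rest 0
  rw [h0, PySem.List.pyGetD_neg_one (a :: rest) 0 hne]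
  rw [show ([pvGetDD d depot a] : List Int)
        ++ pvPref (pvGetDD d depot a) (((a :: rest).zip (a :: rest).tail).map (fun p => pvGetDD d p.1 p.2))
      = _ from dead_main_eq d depot a rest]
  congr 1
  -- final entry
  have hz : (depot :: (a :: rest) ++ [depot]).zip ((depot :: (a :: rest) ++ [depot]).tail)
      = (depot, a) :: (((a :: rest) ++ [depot]).zip (((a :: rest) ++ [depot]).tail)) := by
    simp
  rw [walk_eq, hz, zip_tail_snoc depot (a :: rest) hne]
  simp only [List.map_cons, List.map_append, List.sum_cons, List.sum_append,
    List.map_nil, List.sum_nil, List.getLast_eq_getLastD]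
  congr 1
  ring

-- top-level fold: A's four-accumulator fold equals B's tuple of maps
theorem fold_eq (demand serviceL : List (Int × Int)) (d : List (Int × List (Int × Int)))
    (depot dumpcost : Int) (rs : List (List Int)) (h : ∀ r ∈ rs, r ≠ []) :
    ∀ (w x y z : List (List Int)),
    rs.foldl
      (fun (st : List (List Int) × List (List Int) × List (List Int) × List (List Int)) route =>
        let t := build_CARP_cum_list_from_route route demand serviceL d depot dumpcost
        (st.1 ++ [route], st.2.1 ++ [t.1], st.2.2.1 ++ [t.2.1], st.2.2.2 ++ [t.2.2]))
      (w, x, y, z)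
    = (w ++ rs,
       x ++ rs.map (fun r => (PySem.List.pyRange 0 (r.length : Int) 1).map (fun k =>
         ((PySem.List.slice r none (some (k + 1))).map (fun a => pvGetI demand a)).sum)),
       y ++ rs.map (fun r => (PySem.List.pyRange 0 (r.length : Int) 1).map (fun k =>
         ((PySem.List.slice r none (some (k + 1))).map (fun a => pvGetI serviceL a)).sum)),
       z ++ rs.map (fun r =>
         ((PySem.List.pyRange 0 (r.length : Int) 1).map (fun k =>
            pvWalkCost (depot :: PySem.List.slice r none (some (k + 1))) d))
         ++ [pvWalkCost (depot :: r ++ [depot]) d + dumpcost])) := by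
  induction rs with
  | nil => intro w x y z; simp
  | cons r rs ih =>
    intro w x y z
    simp only [List.foldl_cons]
    rw [route_eq r demand serviceL d depot dumpcost (h r (by simp))]
    rw [ih (fun r hr => h r (by simp [hr]))]
    simp

-- ===== VERDICT (by name: the statement is the Claim_ definition above) =====
theorem build_CARP_cum_list_from_lists_spec : Claim_equal_build_CARP_cum_list_from_lists := by
  intro solution_lists demand serviceL d depot dumpcost _ hpre
  unfold Spec_build_CARP_cum_list_from_lists
  unfold build_CARP_cum_list_from_lists build_CARP_cum_list_from_lists_alt
  have hne : ∀ r ∈ PySem.List.pyGetD solution_lists 0 [], r ≠ [] := by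
    intro r hr
    obtain ⟨_, h2⟩ := hpre
    cases solution_lists with
    | nil => simp [PySem.List.pyGetD_zero] at hr
    | cons s ss =>
      exact (h2 r (by simpa [PySem.List.pyGetD_zero_cons] using hr)).1
  rw [fold_eq demand serviceL d depot dumpcost _ hne]
  simp
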